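-- pv_equiv track=rewrite | github.com/twahidin/ptt_base2 | components/acp_edit_form.py | _highlight_kat_terms
-- ===== SOURCE A (Python) =====
-- def _highlight_kat_terms(text: str) -> str:
--     """Highlight KAT terms in the text"""
--     kat_terms = [
--         "Embed scaffolding", "Facilitate learning together", "Foster conceptual change",
--         "Support assessment for learning", "Develop metacognition", "Provide differentiation",
--         "Enable personalization", "Increase motivation"
--     ]
--
--     highlighted_text = text
--     for term in kat_terms:
--         highlighted_text = highlighted_text.replace(
--             term,
--             f'<span class="kat-highlight">{term}</span>'
--         )
--
--     return highlighted_text.replace('\n', '<br>')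
-- ===== SOURCE B (Python) =====
-- import re
--
-- _KAT_TERMS = [
--     "Embed scaffolding", "Facilitate learning together", "Foster conceptual change",
--     "Support assessment for learning", "Develop metacognition", "Provide differentiation",
--     "Enable personalization", "Increase motivation"
-- ]
--
-- # One compiled alternation: the eight terms plus '\n', replaced in a single
-- # left-to-right pass instead of nine full passes over the text.
-- _KAT_RE = re.compile("|".join(map(re.escape, _KAT_TERMS)) + "|\n")
--
--
-- def _highlight_kat_terms(text: str) -> str:
--     """Highlight KAT terms in the text"""
--     def repl(m):
--         s = m.group(0)
--         if s == "\n":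
--             return "<br>"
--         return f'<span class="kat-highlight">{s}</span>'
--
--     return _KAT_RE.sub(repl, text)
-- ===== Notes on version B (the rewrite author's own statement) =====
-- stated objective: idiomatic
-- what changed: Replaced nine sequential full-string .replace passes by one compiled regex alternation (the eight escaped terms plus '\n') applied in a single left-to-right pass with a replacement callback; equivalent because the terms never overlap each other, the inserted markup, or a newline.
import Mathlib
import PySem

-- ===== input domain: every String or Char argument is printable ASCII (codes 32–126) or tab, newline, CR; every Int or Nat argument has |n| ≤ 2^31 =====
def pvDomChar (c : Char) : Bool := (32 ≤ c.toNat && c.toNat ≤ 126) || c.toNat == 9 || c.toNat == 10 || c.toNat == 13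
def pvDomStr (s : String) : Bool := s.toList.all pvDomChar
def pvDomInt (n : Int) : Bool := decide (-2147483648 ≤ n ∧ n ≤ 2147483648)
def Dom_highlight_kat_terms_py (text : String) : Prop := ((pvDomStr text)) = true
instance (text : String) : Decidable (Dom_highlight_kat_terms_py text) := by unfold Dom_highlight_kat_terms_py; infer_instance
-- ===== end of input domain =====

-- B replaces A's nine sequential full-string .replace passes by a single left-to-right
-- scan against an alternation of the eight terms plus '\n' (idiomatic one-pass regex sub).

-- ===== PORT A =====
def katTerms : List String :=
  ["Embed scaffolding", "Facilitate learning together", "Foster conceptual change",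
   "Support assessment for learning", "Develop metacognition", "Provide differentiation",
   "Enable personalization", "Increase motivation"]

def highlight_kat_terms_py (text : String) : String :=
  PySem.Str.replace
    (katTerms.foldl
      (fun highlighted term =>
        PySem.Str.replace highlighted term ("<span class=\"kat-highlight\">" ++ term ++ "</span>"))
      text)
    "\n" "<br>"

-- ===== PORT B =====
-- Source B compiles ONE alternation (the eight escaped terms, then '\n') and runs re.sub:
-- a single left-to-right pass, each match replaced via the callback.  `katScanGo` is
-- that pass (fuel = remaining length, a totality device only); `katPairs` is the
-- alternation paired with each alternative's replacement.
def katPairs : List (List Char × List Char) :=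
  [("Embed scaffolding".toList, "<span class=\"kat-highlight\">".toList ++ "Embed scaffolding".toList ++ "</span>".toList),
   ("Facilitate learning together".toList, "<span class=\"kat-highlight\">".toList ++ "Facilitate learning together".toList ++ "</span>".toList),
   ("Foster conceptual change".toList, "<span class=\"kat-highlight\">".toList ++ "Foster conceptual change".toList ++ "</span>".toList),
   ("Support assessment for learning".toList, "<span class=\"kat-highlight\">".toList ++ "Support assessment for learning".toList ++ "</span>".toList),
   ("Develop metacognition".toList, "<span class=\"kat-highlight\">".toList ++ "Develop metacognition".toList ++ "</span>".toList),
   ("Provide differentiation".toList, "<span class=\"kat-highlight\">".toList ++ "Provide differentiation".toList ++ "</span>".toList),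
   ("Enable personalization".toList, "<span class=\"kat-highlight\">".toList ++ "Enable personalization".toList ++ "</span>".toList),
   ("Increase motivation".toList, "<span class=\"kat-highlight\">".toList ++ "Increase motivation".toList ++ "</span>".toList),
   ("\n".toList, "<br>".toList)]

def katScanGo (ps : List (List Char × List Char)) : Nat → List Char → List Char
  | _, [] => []
  | 0, l => l
  | fuel+1, c :: t =>
    match ps.find? (fun pr => pr.1.isPrefixOf (c :: t)) with
    | some pr => pr.2 ++ katScanGo ps fuel ((c :: t).drop pr.1.length)
    | none => c :: katScanGo ps fuel t

def katScan (ps : List (List Char × List Char)) (l : List Char) : List Char :=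
  katScanGo ps l.length l

def highlight_kat_terms_py_alt (text : String) : String :=
  String.ofList (katScan katPairs text.toList)

-- ===== PRECONDITION & SPEC =====
def Spec_highlight_kat_terms_py (text : String) (out : String) : Prop := out = highlight_kat_terms_py_alt text
instance (text : String) (out : String) : Decidable (Spec_highlight_kat_terms_py text out) := by unfold Spec_highlight_kat_terms_py; infer_instance

-- ===== CLAIM (what is proved, stated in full; the proofs are below) =====
def Claim_equal_highlight_kat_terms_py : Prop := ∀ (text : String), Dom_highlight_kat_terms_py text → Spec_highlight_kat_terms_py text (highlight_kat_terms_py text)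

-- ===== LEMMAS AND PROOFS =====

-- Decidable side conditions under which appending one (pattern, replacement) pair to a
-- scan is the same as running the corresponding str.replace afterwards.
def stepOK (ps : List (List Char × List Char)) (p r : List Char) : Bool :=
  !p.isEmpty && !p.contains '<' && !p.contains '>' &&
  ps.all (fun pr =>
    !pr.1.isEmpty && !PySem.Chars.isIn p pr.2 &&
    pr.2.head? == some '<' && pr.2.getLast? == some '>' &&
    (List.range p.length).all (fun i =>
      i == 0 || (!pr.1.isPrefixOf (p.drop i) && !(p.drop i).isPrefixOf pr.1)))

def goodChain (ps : List (List Char × List Char)) : List (List Char × List Char) → Bool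
  | [] => true
  | q :: qs => stepOK ps q.1 q.2 && goodChain (ps ++ [q]) qs

theorem katScanGo_fuel (ps : List (List Char × List Char))
    (hne : ∀ pr ∈ ps, pr.1 ≠ ([] : List Char)) :
    ∀ fuel l, l.length ≤ fuel → katScanGo ps fuel l = katScan ps l := by
  intro fuel
  induction fuel using Nat.strong_induction_on with
  | _ fuel IH =>
    intro l hl
    rcases l with _ | ⟨c, t⟩
    · rcases fuel with _ | fuel <;> rfl
    · rcases fuel with _ | fuel
      · simp at hl
      · have hlt : t.length ≤ fuel := by simpa using hl
        show katScanGo ps (fuel+1) (c :: t) = katScanGo ps (c :: t).length (c :: t)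
        simp only [List.length_cons]
        simp only [katScanGo]
        cases hf : ps.find? (fun pr => pr.1.isPrefixOf (c :: t)) with
        | none =>
          dsimp only
          have h1 := IH fuel (by omega) t hlt
          have h2 := IH t.length (by omega) t (le_refl _)
          rw [h1, h2]
        | some pr =>
          dsimp only
          have hq := hne pr (List.mem_of_find?_eq_some hf)
          have hqlen : 1 ≤ pr.1.length := by
            cases h : pr.1 with
            | nil => exact absurd h hq
            | cons a b => simp
          have hdl : ((c :: t).drop pr.1.length).length ≤ t.length := by
            simp only [List.length_drop, List.length_cons]; omega
          have h1 := IH fuel (by omega) ((c :: t).drop pr.1.length) (le_trans hdl hlt)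
          have h2 := IH t.length (by omega) ((c :: t).drop pr.1.length) hdl
          rw [h1, h2]


theorem katScan_cons_none (ps : List (List Char × List Char)) (c : Char) (t : List Char)
    (hf : ps.find? (fun pr => pr.1.isPrefixOf (c :: t)) = none) :
    katScan ps (c :: t) = c :: katScan ps t := by
  show katScanGo ps (c :: t).length (c :: t) = c :: katScan ps t
  simp only [List.length_cons, katScanGo, hf]
  rfl

theorem katScan_cons_some (ps : List (List Char × List Char)) (c : Char) (t : List Char)
    (pr : List Char × List Char)
    (hne : ∀ pr ∈ ps, pr.1 ≠ ([] : List Char))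
    (hf : ps.find? (fun pr => pr.1.isPrefixOf (c :: t)) = some pr) :
    katScan ps (c :: t) = pr.2 ++ katScan ps ((c :: t).drop pr.1.length) := by
  have hq := hne pr (List.mem_of_find?_eq_some hf)
  have hqlen : 1 ≤ pr.1.length := by
    cases h : pr.1 with
    | nil => exact absurd h hq
    | cons a b => simp
  show katScanGo ps (c :: t).length (c :: t) = _
  simp only [List.length_cons, katScanGo, hf]
  congr 1
  exact katScanGo_fuel ps hne t.length _ (by simp only [List.length_drop, List.length_cons]; omega)

theorem katScan_nil_ps : ∀ cs : List Char, katScan [] cs = cs := by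
  intro cs
  induction cs with
  | nil => rfl
  | cons c t IH =>
    rw [katScan_cons_none [] c t (by simp), IH]

theorem katScan_copy (ps : List (List Char × List Char)) :
    ∀ u v : List Char,
      (∀ i, i < u.length → ps.find? (fun pr => pr.1.isPrefixOf (u.drop i ++ v)) = none) →
      katScan ps (u ++ v) = u ++ katScan ps v := by
  intro u
  induction u with
  | nil => intro v _; simp
  | cons c u' IH =>
    intro v h
    have h0 : ps.find? (fun pr => pr.1.isPrefixOf (c :: (u' ++ v))) = none := by
      have := h 0 (by simp)
      simpa using this
    have : katScan ps (c :: (u' ++ v)) = c :: katScan ps (u' ++ v) :=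
      katScan_cons_none ps c (u' ++ v) h0
    simp only [List.cons_append, this]
    rw [IH v (fun i hi => by
      have := h (i+1) (by simp; omega)
      simpa using this)]

theorem katScan_not_prefix (ps : List (List Char × List Char))
    (hne : ∀ pr ∈ ps, pr.1 ≠ ([] : List Char))
    (hhead : ∀ pr ∈ ps, pr.2.head? = some '<') :
    ∀ (cs p : List Char), p ≠ [] → '<' ∉ p → ¬ p <+: cs → ¬ p <+: katScan ps cs := by
  intro cs
  induction cs with
  | nil =>
    intro p hp _ _ hcontra
    rw [show katScan ps [] = [] from rfl, List.prefix_nil] at hcontra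
    exact hp hcontra
  | cons c t IH =>
    intro p hp hlt hnpre
    cases hf : ps.find? (fun pr => pr.1.isPrefixOf (c :: t)) with
    | some pr =>
      rw [katScan_cons_some ps c t pr hne hf]
      have hh := hhead pr (List.mem_of_find?_eq_some hf)
      rcases h2 : pr.2 with _ | ⟨a, s'⟩
      · rw [h2] at hh; simp at hh
      · rw [h2] at hh; simp at hh
        subst hh
        intro hcontra
        rcases p with _ | ⟨b, p'⟩
        · exact hp rfl
        · rw [List.cons_append, List.cons_prefix_cons] at hcontra
          exact hlt (hcontra.1 ▸ List.mem_cons_self)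
    | none =>
      rw [katScan_cons_none ps c t hf]
      intro hcontra
      rcases p with _ | ⟨b, p'⟩
      · exact hp rfl
      · rw [List.cons_prefix_cons] at hcontra
        obtain ⟨hb, hp'⟩ := hcontra
        subst hb
        rcases p' with _ | ⟨d, p''⟩
        · exact hnpre (by simp)
        · have hnp' : ¬ (d :: p'') <+: t := by
            intro hx
            exact hnpre (List.cons_prefix_cons.mpr ⟨rfl, hx⟩)
          exact IH (d :: p'') (by simp) (fun hm => hlt (List.mem_cons_of_mem _ hm)) hnp' hp'

theorem katScan_step (ps : List (List Char × List Char)) (p r : List Char)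
    (hok : stepOK ps p r = true) :
    ∀ n (cs : List Char), cs.length ≤ n →
      katScan [(p, r)] (katScan ps cs) = katScan (ps ++ [(p, r)]) cs := by
  simp only [stepOK, Bool.and_eq_true, Bool.not_eq_true', List.all_eq_true] at hok
  obtain ⟨⟨⟨hpne', hlt'⟩, hgt'⟩, hps⟩ := hok
  have hpne : p ≠ [] := by simpa [List.isEmpty_iff] using hpne'
  have hlt : '<' ∉ p := by simpa using hlt'
  have hgt : '>' ∉ p := by simpa using hgt'
  have hne : ∀ pr ∈ ps, pr.1 ≠ ([] : List Char) := by
    intro pr hm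
    have := (hps pr hm).1.1.1.1
    simpa [List.isEmpty_iff] using this
  have hne1 : ∀ pr ∈ [(p, r)], pr.1 ≠ ([] : List Char) := by
    intro pr hm; simp at hm; subst hm; exact hpne
  have hne2 : ∀ pr ∈ ps ++ [(p, r)], pr.1 ≠ ([] : List Char) := by
    intro pr hm
    rcases List.mem_append.mp hm with h | h
    · exact hne pr h
    · exact hne1 pr h
  have hsub : ∀ pr ∈ ps, ¬ p <:+: pr.2 := by
    intro pr hm
    have := (hps pr hm).1.1.1.2
    exact (PySem.Chars.isIn_eq_false_iff p pr.2).mp this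
  have hhead : ∀ pr ∈ ps, pr.2.head? = some '<' := by
    intro pr hm
    have := (hps pr hm).1.1.2
    simpa using this
  have hlast : ∀ pr ∈ ps, pr.2.getLast? = some '>' := by
    intro pr hm
    have := (hps pr hm).1.2
    simpa using this
  have hov : ∀ pr ∈ ps, ∀ i, 0 < i → i < p.length →
      ¬ pr.1 <+: p.drop i ∧ ¬ p.drop i <+: pr.1 := by
    intro pr hm i h0 hi
    have := (hps pr hm).2 i (List.mem_range.mpr hi)
    rcases Bool.or_eq_true .. |>.mp this with h | h
    · exfalso; revert h; simp; omega
    · rw [Bool.and_eq_true, Bool.not_eq_true', Bool.not_eq_true'] at h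
      exact ⟨by rw [← List.isPrefixOf_iff_prefix]; simp [h.1],
             by rw [← List.isPrefixOf_iff_prefix]; simp [h.2]⟩
  -- a replacement block (ending in '>' and not containing p) passes through the
  -- single-pattern scan untouched
  have hthrough : ∀ (s X : List Char), s.getLast? = some '>' → ¬ p <:+: s →
      katScan [(p, r)] (s ++ X) = s ++ katScan [(p, r)] X := by
    intro s X hsl hsin
    apply katScan_copy
    intro i hi
    rw [List.find?_eq_none]
    intro pr hm
    simp only [List.mem_singleton] at hm
    subst hm
    simp only [List.isPrefixOf_iff_prefix]
    intro hpre
    rcases Nat.lt_or_ge (s.drop i).length p.length with hlen | hle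
    · have hdp : s.drop i <+: p :=
        List.prefix_of_prefix_length_le (List.prefix_append _ _) hpre (le_of_lt hlen)
      have hdl : (s.drop i).getLast? = some '>' := by
        rw [List.getLast?_drop, if_neg (by omega)]
        exact hsl
      obtain ⟨ys, hys⟩ := List.getLast?_eq_some_iff.mp hdl
      have hmem : '>' ∈ s.drop i := by rw [hys]; simp
      exact hgt (hdp.sublist.subset hmem)
    · have hpp : p <+: s.drop i :=
        List.prefix_of_prefix_length_le hpre (List.prefix_append _ _) hle
      exact hsin (hpp.isInfix.trans (List.drop_suffix i s).isInfix)
  intro n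
  induction n with
  | zero =>
    intro cs hcs
    have : cs = [] := List.length_eq_zero_iff.mp (Nat.le_zero.mp hcs)
    subst this; rfl
  | succ n IH =>
    intro cs hcs
    rcases cs with _ | ⟨c, t⟩
    · rfl
    · have hts : t.length ≤ n := by simpa using hcs
      cases hf : ps.find? (fun pr => pr.1.isPrefixOf (c :: t)) with
      | some pr =>
        have hmem := List.mem_of_find?_eq_some hf
        have hf2 : (ps ++ [(p, r)]).find? (fun pr => pr.1.isPrefixOf (c :: t)) = some pr := by
          rw [List.find?_append, hf]; rfl
        rw [katScan_cons_some ps c t pr hne hf,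
            katScan_cons_some (ps ++ [(p, r)]) c t pr hne2 hf2]
        rw [hthrough pr.2 _ (hlast pr hmem) (hsub pr hmem)]
        congr 1
        have hqlen : 1 ≤ pr.1.length := by
          cases h : pr.1 with
          | nil => exact absurd h (hne pr hmem)
          | cons a b => simp
        exact IH ((c :: t).drop pr.1.length)
          (by simp only [List.length_drop, List.length_cons]; omega)
      | none =>
        cases hp : p.isPrefixOf (c :: t) with
        | true =>
          have hpre : p <+: c :: t := List.isPrefixOf_iff_prefix.mp hp
          obtain ⟨w, hw⟩ := hpre
          have hplen : 1 ≤ p.length := by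
            cases h : p with
            | nil => exact absurd h hpne
            | cons a b => simp
          have hwlen : w.length ≤ n := by
            have : p.length + w.length = t.length + 1 := by
              have := congrArg List.length hw
              simpa using this
            omega
          -- the ps-scan copies the matched occurrence of p verbatim
          have hcopy : katScan ps (p ++ w) = p ++ katScan ps w := by
            apply katScan_copy
            intro i hi
            rcases Nat.eq_zero_or_pos i with h0 | h0
            · subst h0
              simpa [hw] using hf
            · rw [List.find?_eq_none]
              intro pr hm
              simp only [List.isPrefixOf_iff_prefix]
              intro hpre2
              rcases Nat.lt_or_ge (p.drop i).length pr.1.length with hlen | hle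
              · exact (hov pr hm i h0 hi).2
                  (List.prefix_of_prefix_length_le (List.prefix_append _ _) hpre2 (le_of_lt hlen))
              · exact (hov pr hm i h0 hi).1
                  (List.prefix_of_prefix_length_le hpre2 (List.prefix_append _ _) hle)
          -- LHS: the p-scan fires on the copied occurrence
          have hfp : ([(p, r)] : List (List Char × List Char)).find?
              (fun pr => pr.1.isPrefixOf (p ++ katScan ps w)) = some (p, r) := by
            have : p.isPrefixOf (p ++ katScan ps w) = true :=
              List.isPrefixOf_iff_prefix.mpr (List.prefix_append _ _)
            simp [List.find?, this]
          have hstep1 : katScan [(p, r)] (p ++ katScan ps w)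
              = r ++ katScan [(p, r)] (katScan ps w) := by
            rcases hpd : p with _ | ⟨a, p'⟩
            · exact absurd hpd hpne
            · rw [← hpd, show p ++ katScan ps w = a :: (p' ++ katScan ps w) by rw [hpd]; rfl]
              rw [katScan_cons_some [(p, r)] a (p' ++ katScan ps w) (p, r) hne1
                (by rw [show a :: (p' ++ katScan ps w) = p ++ katScan ps w by rw [hpd]; rfl]; exact hfp)]
              rw [show a :: (p' ++ katScan ps w) = p ++ katScan ps w by rw [hpd]; rfl]
              rw [List.drop_left]
          -- RHS: the appended pattern fires
          have hf2 : (ps ++ [(p, r)]).find? (fun pr => pr.1.isPrefixOf (c :: t)) = some (p, r) := by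
            rw [List.find?_append, hf]
            simp [List.find?, hp]
          rw [← hw, hcopy, hstep1, IH w hwlen]
          rw [hw, katScan_cons_some (ps ++ [(p, r)]) c t (p, r) hne2 hf2]
          show r ++ _ = r ++ _
          congr 1
          rw [← hw, List.drop_left]
        | false =>
          have hnpre : ¬ p <+: c :: t := by
            rw [← List.isPrefixOf_iff_prefix, hp]; simp
          have h1 : katScan ps (c :: t) = c :: katScan ps t := katScan_cons_none ps c t hf
          have hnp2 : ¬ p <+: katScan ps (c :: t) :=
            katScan_not_prefix ps hne hhead (c :: t) p hpne hlt hnpre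
          rw [h1] at hnp2
          have hfneither : ([(p, r)] : List (List Char × List Char)).find?
              (fun pr => pr.1.isPrefixOf (c :: katScan ps t)) = none := by
            rw [List.find?_eq_none]
            intro pr hm
            simp only [List.mem_singleton] at hm
            subst hm
            simp only [List.isPrefixOf_iff_prefix]
            exact hnp2
          have hf2 : (ps ++ [(p, r)]).find? (fun pr => pr.1.isPrefixOf (c :: t)) = none := by
            rw [List.find?_append, hf]
            simp [List.find?, hp]
          rw [h1, katScan_cons_none [(p, r)] c (katScan ps t) hfneither,
              katScan_cons_none (ps ++ [(p, r)]) c t hf2, IH t hts]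

theorem replace_go_eq (old new : List Char) (hold : old ≠ []) :
    ∀ fuel (l acc : List Char), l.length ≤ fuel →
      PySem.Chars.replace.go old new fuel l acc = acc.reverse ++ katScan [(old, new)] l := by
  intro fuel
  induction fuel with
  | zero =>
    intro l acc hl
    have : l = [] := List.length_eq_zero_iff.mp (Nat.le_zero.mp hl)
    subst this
    show acc.reverse ++ [] = acc.reverse ++ katScan [(old, new)] []
    rfl
  | succ fuel IH =>
    intro l acc hl
    rcases l with _ | ⟨c, t⟩
    · show acc.reverse = acc.reverse ++ katScan [(old, new)] []
      simp [katScan, katScanGo]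
    · have holdlen : 1 ≤ old.length := by
        cases h : old with
        | nil => exact absurd h hold
        | cons a b => simp
      show (if old.isPrefixOf (c :: t) = true
            then PySem.Chars.replace.go old new fuel ((c :: t).drop old.length) (new.reverse ++ acc)
            else PySem.Chars.replace.go old new fuel t (c :: acc))
          = acc.reverse ++ katScan [(old, new)] (c :: t)
      cases hp : old.isPrefixOf (c :: t) with
      | true =>
        rw [if_pos rfl]
        have hfp : ([(old, new)] : List (List Char × List Char)).find?
            (fun pr => pr.1.isPrefixOf (c :: t)) = some (old, new) := by
          simp [List.find?, hp]
        have hne1 : ∀ pr ∈ [(old, new)], pr.1 ≠ ([] : List Char) := by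
          intro pr hm; simp at hm; subst hm; exact hold
        rw [IH _ _ (by simp only [List.length_drop, List.length_cons]; simp at hl; omega),
            katScan_cons_some [(old, new)] c t (old, new) hne1 hfp]
        simp
      | false =>
        rw [if_neg (by simp [hp])]
        have hfn : ([(old, new)] : List (List Char × List Char)).find?
            (fun pr => pr.1.isPrefixOf (c :: t)) = none := by
          simp [List.find?, hp]
        rw [IH _ _ (by simpa using Nat.le_of_succ_le_succ hl),
            katScan_cons_none [(old, new)] c t hfn]
        simp

theorem replace_eq_katScan (old new : List Char) (hold : old ≠ []) (s : List Char) :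
    PySem.Chars.replace s old new = katScan [(old, new)] s := by
  rw [PySem.Chars.replace, if_neg (by simpa [List.isEmpty_iff] using hold)]
  rw [replace_go_eq old new hold s.length s [] (le_refl _)]
  rfl

theorem chain_lemma :
    ∀ (qs ps : List (List Char × List Char)), goodChain ps qs = true →
      (∀ pr ∈ ps, pr.1 ≠ ([] : List Char)) →
      ∀ cs : List Char,
        qs.foldl (fun acc q => PySem.Chars.replace acc q.1 q.2) (katScan ps cs)
          = katScan (ps ++ qs) cs := by
  intro qs
  induction qs with
  | nil => intro ps _ _ cs; simp
  | cons q qs' IH =>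
    intro ps hg hne cs
    rw [goodChain, Bool.and_eq_true] at hg
    obtain ⟨hok, hg'⟩ := hg
    have hqne : q.1 ≠ [] := by
      have := hok
      simp only [stepOK, Bool.and_eq_true, Bool.not_eq_true'] at this
      simpa [List.isEmpty_iff] using this.1.1.1
    have hne' : ∀ pr ∈ ps ++ [q], pr.1 ≠ ([] : List Char) := by
      intro pr hm
      rcases List.mem_append.mp hm with h | h
      · exact hne pr h
      · simp at h; subst h; exact hqne
    show List.foldl _ (PySem.Chars.replace (katScan ps cs) q.1 q.2) qs' = _
    rw [replace_eq_katScan q.1 q.2 hqne,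
        katScan_step ps q.1 q.2 hok cs.length cs (le_refl _)]
    rw [IH (ps ++ [q]) hg' hne' cs]
    simp

theorem foldl_replace_toList (ts : List String) : ∀ s : String,
    (ts.foldl
      (fun highlighted term =>
        PySem.Str.replace highlighted term ("<span class=\"kat-highlight\">" ++ term ++ "</span>"))
      s).toList
    = ts.foldl
        (fun acc t => PySem.Chars.replace acc t.toList
          ("<span class=\"kat-highlight\">".toList ++ t.toList ++ "</span>".toList))
        s.toList := by
  induction ts with
  | nil => intro s; rfl
  | cons t ts IH =>
    intro s
    rw [List.foldl_cons, List.foldl_cons, IH]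
    congr 1
    rw [PySem.Str.toList_replace]
    congr 1
    rw [String.toList_append, String.toList_append]

set_option maxRecDepth 100000 in
theorem kat_goodChain : goodChain [] katPairs = true := by decide

set_option maxRecDepth 100000 in
theorem main_eq (text : String) :
    highlight_kat_terms_py text = highlight_kat_terms_py_alt text := by
  have hchain := chain_lemma katPairs [] kat_goodChain (by simp) text.toList
  rw [katScan_nil_ps, List.nil_append] at hchain
  unfold highlight_kat_terms_py highlight_kat_terms_py_alt
  have hl : (PySem.Str.replace
      (katTerms.foldl
        (fun highlighted term =>
          PySem.Str.replace highlighted term ("<span class=\"kat-highlight\">" ++ term ++ "</span>"))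
        text) "\n" "<br>").toList = katScan katPairs text.toList := by
    rw [PySem.Str.toList_replace, foldl_replace_toList katTerms text, ← hchain]
    rw [show katPairs
          = (katTerms.map (fun t =>
              (t.toList, "<span class=\"kat-highlight\">".toList ++ t.toList ++ "</span>".toList)))
            ++ [("\n".toList, "<br>".toList)] from rfl]
    rw [List.foldl_append, List.foldl_map, List.foldl_cons, List.foldl_nil]
  rw [← String.ofList_toList (s := PySem.Str.replace _ "\n" "<br>"), hl]

-- ===== VERDICT (by name: the statement is the Claim_ definition above) =====
theorem highlight_kat_terms_py_spec : Claim_equal_highlight_kat_terms_py := by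
  intro text _
  show highlight_kat_terms_py text = highlight_kat_terms_py_alt text
  exact main_eq text
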